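-- pv_equiv track=rewrite | github.com/TBC-HM/namkhan-bi | scripts/load_txn_2026.py | normalise_class
-- ===== SOURCE A (Python) =====
-- CLASS_MAP = {
--     'F&B': 'fb', 'F & B': 'fb', 'FB': 'fb', 'fb': 'fb',
--     'Undistributed': 'undistributed', 'undistributed': 'undistributed',
--     'Rooms': 'rooms', 'rooms': 'rooms',
--     'Spa': 'spa', 'spa': 'spa',
--     'Transport': 'transport', 'transport': 'transport',
--     'IMekong': 'imekong', 'iMekong': 'imekong', 'IMEKONG': 'imekong', 'imekong': 'imekong',
--     'Activities': 'activities', 'activities': 'activities',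
--     'Retail': 'retail', 'retail': 'retail',
--     'Not specified': 'not_specified', 'Not Specified': 'not_specified',
--     'not_specified': 'not_specified',
-- }
--
-- VALID_CLASSES = {'not_specified','undistributed','fb','rooms','spa','transport','imekong','activities','retail'}
--
-- def normalise_class(raw) -> str:
--     if raw is None:
--         return 'not_specified'
--     s = str(raw).strip()
--     if not s:
--         return 'not_specified'
--     if s in CLASS_MAP:
--         return CLASS_MAP[s]
--     sl = s.lower()
--     for k, v in CLASS_MAP.items():
--         if k.lower() == sl:
--             return v
--     if sl in VALID_CLASSES:
--         return sl
--     return 'not_specified'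
-- ===== SOURCE B (Python) =====
-- # No lookup table at all: strip+lowercase once, then a short decision chain.
-- # All of A's case-insensitive map keys fold to 'f&b'/'f & b'/'fb' -> 'fb',
-- # 'not specified'/'not_specified' -> 'not_specified', and the remaining
-- # canonical class names, which map to themselves; everything else (including
-- # None and blank input) is 'not_specified'.
-- def normalise_class(raw) -> str:
--     if raw is None:
--         return 'not_specified'
--     s = str(raw).strip().lower()
--     if s in ('f&b', 'f & b', 'fb'):
--         return 'fb'
--     if s in ('not specified', 'not_specified'):
--         return 'not_specified'
--     if s in ('undistributed', 'rooms', 'spa', 'transport', 'imekong', 'activities', 'retail'):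
--         return s
--     return 'not_specified'
-- ===== Notes on version B (the rewrite author's own statement) =====
-- stated objective: simpler
-- what changed: Drops the lookup tables entirely: instead of A's exact dict hit, linear case-insensitive scan over CLASS_MAP items and VALID_CLASSES membership test, B folds the input to lowercase once and decides with a three-branch chain (the 'fb' aliases, the 'not specified' aliases, and the self-mapping canonical names).
import Mathlib
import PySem

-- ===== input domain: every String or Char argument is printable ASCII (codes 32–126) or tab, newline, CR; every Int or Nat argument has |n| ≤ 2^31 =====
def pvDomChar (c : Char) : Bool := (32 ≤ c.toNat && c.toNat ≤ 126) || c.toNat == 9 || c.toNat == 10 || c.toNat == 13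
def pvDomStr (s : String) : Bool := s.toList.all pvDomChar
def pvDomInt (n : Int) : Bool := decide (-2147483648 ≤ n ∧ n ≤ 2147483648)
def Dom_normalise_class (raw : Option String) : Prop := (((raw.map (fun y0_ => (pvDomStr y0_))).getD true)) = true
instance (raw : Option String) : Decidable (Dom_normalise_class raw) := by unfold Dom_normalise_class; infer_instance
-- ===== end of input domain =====

-- B drops A's lookup tables: one strip+lowercase, then a three-branch alias chain; simpler, same results.

-- ===== PORT A =====
def CLASS_MAP : PySem.Dict String String := PySem.Dict.ofList [
  ("F&B","fb"), ("F & B","fb"), ("FB","fb"), ("fb","fb"),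
  ("Undistributed","undistributed"), ("undistributed","undistributed"),
  ("Rooms","rooms"), ("rooms","rooms"),
  ("Spa","spa"), ("spa","spa"),
  ("Transport","transport"), ("transport","transport"),
  ("IMekong","imekong"), ("iMekong","imekong"), ("IMEKONG","imekong"), ("imekong","imekong"),
  ("Activities","activities"), ("activities","activities"),
  ("Retail","retail"), ("retail","retail"),
  ("Not specified","not_specified"), ("Not Specified","not_specified"),
  ("not_specified","not_specified")]

def VALID_CLASSES : PySem.Set String := PySem.Set.ofList
  ["not_specified","undistributed","fb","rooms","spa","transport","imekong","activities","retail"]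

def normalise_class (raw : Option String) : String :=
  match raw with
  | none => "not_specified"
  | some r =>
    let s := PySem.Str.strip r
    if s = "" then "not_specified"
    else
      match CLASS_MAP.get? s with
      | some v => v
      | none =>
        let sl := PySem.Str.lower s
        -- 'for k, v in CLASS_MAP.items(): if k.lower() == sl: return v' = first match over the items
        match CLASS_MAP.items.find? (fun kv => PySem.Str.lower kv.1 == sl) with
        | some kv => kv.2
        | none => if sl ∈ VALID_CLASSES then sl else "not_specified"

-- ===== PORT B =====
def normalise_class_alt (raw : Option String) : String :=
  match raw with
  | none => "not_specified"
  | some r =>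
    let s := PySem.Str.lower (PySem.Str.strip r)
    if s = "f&b" ∨ s = "f & b" ∨ s = "fb" then "fb"
    else if s = "not specified" ∨ s = "not_specified" then "not_specified"
    else if s = "undistributed" ∨ s = "rooms" ∨ s = "spa" ∨ s = "transport" ∨
            s = "imekong" ∨ s = "activities" ∨ s = "retail" then s
    else "not_specified"

-- ===== PRECONDITION & SPEC =====
def Spec_normalise_class (raw : Option String) (out : String) : Prop := out = normalise_class_alt raw
instance (raw : Option String) (out : String) : Decidable (Spec_normalise_class raw out) := by unfold Spec_normalise_class; infer_instance

-- ===== CLAIM (what is proved, stated in full; the proofs are below) =====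
def Claim_equal_normalise_class : Prop := ∀ (raw : Option String), Dom_normalise_class raw → Spec_normalise_class raw (normalise_class raw)

-- ===== LEMMAS AND PROOFS =====

theorem normalise_class_eq_alt (raw : Option String) : normalise_class raw = normalise_class_alt raw := by
  cases raw with
  | none => rfl
  | some r =>
    simp only [normalise_class, normalise_class_alt]
    generalize PySem.Str.strip r = s
    by_cases hs : s = ""
    · subst hs; decide
    rw [if_neg hs]
    cases hget : CLASS_MAP.get? s with
    | some v =>
      have hmem : (s, v) ∈ CLASS_MAP.items := PySem.Dict.mem_items_of_get?_eq_some _ hget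
      rw [show CLASS_MAP.items = [("F&B","fb"), ("F & B","fb"), ("FB","fb"), ("fb","fb"), ("Undistributed","undistributed"), ("undistributed","undistributed"), ("Rooms","rooms"), ("rooms","rooms"), ("Spa","spa"), ("spa","spa"), ("Transport","transport"), ("transport","transport"), ("IMekong","imekong"), ("iMekong","imekong"), ("IMEKONG","imekong"), ("imekong","imekong"), ("Activities","activities"), ("activities","activities"), ("Retail","retail"), ("retail","retail"), ("Not specified","not_specified"), ("Not Specified","not_specified"), ("not_specified","not_specified")] from by decide] at hmem
      simp only [List.mem_cons, List.not_mem_nil, or_false, Prod.mk.injEq] at hmem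
      rcases hmem with (⟨rfl,rfl⟩|⟨rfl,rfl⟩|⟨rfl,rfl⟩|⟨rfl,rfl⟩|⟨rfl,rfl⟩|⟨rfl,rfl⟩|⟨rfl,rfl⟩|⟨rfl,rfl⟩|⟨rfl,rfl⟩|⟨rfl,rfl⟩|⟨rfl,rfl⟩|⟨rfl,rfl⟩|⟨rfl,rfl⟩|⟨rfl,rfl⟩|⟨rfl,rfl⟩|⟨rfl,rfl⟩|⟨rfl,rfl⟩|⟨rfl,rfl⟩|⟨rfl,rfl⟩|⟨rfl,rfl⟩|⟨rfl,rfl⟩|⟨rfl,rfl⟩|⟨rfl,rfl⟩) <;> decide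
    | none =>
      cases hfind : CLASS_MAP.items.find? (fun kv => PySem.Str.lower kv.1 == PySem.Str.lower s) with
      | some kv =>
        obtain ⟨k, v⟩ := kv
        have hp : PySem.Str.lower k = PySem.Str.lower s := eq_of_beq (by simpa using List.find?_some hfind)
        have hmem := List.mem_of_find?_eq_some hfind
        rw [show CLASS_MAP.items = [("F&B","fb"), ("F & B","fb"), ("FB","fb"), ("fb","fb"), ("Undistributed","undistributed"), ("undistributed","undistributed"), ("Rooms","rooms"), ("rooms","rooms"), ("Spa","spa"), ("spa","spa"), ("Transport","transport"), ("transport","transport"), ("IMekong","imekong"), ("iMekong","imekong"), ("IMEKONG","imekong"), ("imekong","imekong"), ("Activities","activities"), ("activities","activities"), ("Retail","retail"), ("retail","retail"), ("Not specified","not_specified"), ("Not Specified","not_specified"), ("not_specified","not_specified")] from by decide] at hmem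
        simp only [List.mem_cons, List.not_mem_nil, or_false, Prod.mk.injEq] at hmem
        rcases hmem with (⟨rfl,rfl⟩|⟨rfl,rfl⟩|⟨rfl,rfl⟩|⟨rfl,rfl⟩|⟨rfl,rfl⟩|⟨rfl,rfl⟩|⟨rfl,rfl⟩|⟨rfl,rfl⟩|⟨rfl,rfl⟩|⟨rfl,rfl⟩|⟨rfl,rfl⟩|⟨rfl,rfl⟩|⟨rfl,rfl⟩|⟨rfl,rfl⟩|⟨rfl,rfl⟩|⟨rfl,rfl⟩|⟨rfl,rfl⟩|⟨rfl,rfl⟩|⟨rfl,rfl⟩|⟨rfl,rfl⟩|⟨rfl,rfl⟩|⟨rfl,rfl⟩|⟨rfl,rfl⟩) <;> (rw [← hp]; decide)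
      | none =>
        have hnone := List.find?_eq_none.mp hfind
        rw [show CLASS_MAP.items = [("F&B","fb"), ("F & B","fb"), ("FB","fb"), ("fb","fb"), ("Undistributed","undistributed"), ("undistributed","undistributed"), ("Rooms","rooms"), ("rooms","rooms"), ("Spa","spa"), ("spa","spa"), ("Transport","transport"), ("transport","transport"), ("IMekong","imekong"), ("iMekong","imekong"), ("IMEKONG","imekong"), ("imekong","imekong"), ("Activities","activities"), ("activities","activities"), ("Retail","retail"), ("retail","retail"), ("Not specified","not_specified"), ("Not Specified","not_specified"), ("not_specified","not_specified")] from by decide] at hnone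
        simp only [Bool.not_eq_true] at hnone
        set sl := PySem.Str.lower s with hsl
        by_cases hv : sl ∈ VALID_CLASSES
        · exfalso
          rw [show VALID_CLASSES = PySem.Set.ofList ["not_specified", "undistributed", "fb", "rooms", "spa", "transport", "imekong", "activities", "retail"] from rfl,
              show PySem.Set.ofList ["not_specified", "undistributed", "fb", "rooms", "spa", "transport", "imekong", "activities", "retail"] = (["not_specified", "undistributed", "fb", "rooms", "spa", "transport", "imekong", "activities", "retail"] : List String) from by decide] at hv
          simp only [List.mem_cons, List.not_mem_nil, or_false] at hv
          rcases hv with (h|h|h|h|h|h|h|h|h) <;>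
            first
            | (have hx : (PySem.Str.lower "not_specified" == sl) = false := hnone ("not_specified","not_specified") (by decide); rw [h] at hx; exact absurd hx (by decide))
            | (have hx : (PySem.Str.lower "undistributed" == sl) = false := hnone ("undistributed","undistributed") (by decide); rw [h] at hx; exact absurd hx (by decide))
            | (have hx : (PySem.Str.lower "fb" == sl) = false := hnone ("fb","fb") (by decide); rw [h] at hx; exact absurd hx (by decide))
            | (have hx : (PySem.Str.lower "rooms" == sl) = false := hnone ("rooms","rooms") (by decide); rw [h] at hx; exact absurd hx (by decide))
            | (have hx : (PySem.Str.lower "spa" == sl) = false := hnone ("spa","spa") (by decide); rw [h] at hx; exact absurd hx (by decide))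
            | (have hx : (PySem.Str.lower "transport" == sl) = false := hnone ("transport","transport") (by decide); rw [h] at hx; exact absurd hx (by decide))
            | (have hx : (PySem.Str.lower "imekong" == sl) = false := hnone ("imekong","imekong") (by decide); rw [h] at hx; exact absurd hx (by decide))
            | (have hx : (PySem.Str.lower "activities" == sl) = false := hnone ("activities","activities") (by decide); rw [h] at hx; exact absurd hx (by decide))
            | (have hx : (PySem.Str.lower "retail" == sl) = false := hnone ("retail","retail") (by decide); rw [h] at hx; exact absurd hx (by decide))
        · rw [if_neg hv]
          have ne_of : ∀ (k v : String), (k, v) ∈ ([("F&B","fb"), ("F & B","fb"), ("FB","fb"), ("fb","fb"), ("Undistributed","undistributed"), ("undistributed","undistributed"), ("Rooms","rooms"), ("rooms","rooms"), ("Spa","spa"), ("spa","spa"), ("Transport","transport"), ("transport","transport"), ("IMekong","imekong"), ("iMekong","imekong"), ("IMEKONG","imekong"), ("imekong","imekong"), ("Activities","activities"), ("activities","activities"), ("Retail","retail"), ("retail","retail"), ("Not specified","not_specified"), ("Not Specified","not_specified"), ("not_specified","not_specified")] : List (String × String)) → sl ≠ PySem.Str.lower k := by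
            intro k v hm heq
            have := hnone (k, v) hm
            rw [← heq] at this
            simp at this
          have h0 : sl ≠ "f&b" := by have := ne_of "F&B" "fb" (by decide); rwa [show PySem.Str.lower "F&B" = "f&b" from by decide] at this
          have h1 : sl ≠ "f & b" := by have := ne_of "F & B" "fb" (by decide); rwa [show PySem.Str.lower "F & B" = "f & b" from by decide] at this
          have h2 : sl ≠ "fb" := by have := ne_of "fb" "fb" (by decide); rwa [show PySem.Str.lower "fb" = "fb" from by decide] at this
          have h3 : sl ≠ "not specified" := by have := ne_of "Not specified" "not_specified" (by decide); rwa [show PySem.Str.lower "Not specified" = "not specified" from by decide] at this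
          have h4 : sl ≠ "not_specified" := by have := ne_of "not_specified" "not_specified" (by decide); rwa [show PySem.Str.lower "not_specified" = "not_specified" from by decide] at this
          have h5 : sl ≠ "undistributed" := by have := ne_of "undistributed" "undistributed" (by decide); rwa [show PySem.Str.lower "undistributed" = "undistributed" from by decide] at this
          have h6 : sl ≠ "rooms" := by have := ne_of "rooms" "rooms" (by decide); rwa [show PySem.Str.lower "rooms" = "rooms" from by decide] at this
          have h7 : sl ≠ "spa" := by have := ne_of "spa" "spa" (by decide); rwa [show PySem.Str.lower "spa" = "spa" from by decide] at this
          have h8 : sl ≠ "transport" := by have := ne_of "transport" "transport" (by decide); rwa [show PySem.Str.lower "transport" = "transport" from by decide] at this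
          have h9 : sl ≠ "imekong" := by have := ne_of "imekong" "imekong" (by decide); rwa [show PySem.Str.lower "imekong" = "imekong" from by decide] at this
          have h10 : sl ≠ "activities" := by have := ne_of "activities" "activities" (by decide); rwa [show PySem.Str.lower "activities" = "activities" from by decide] at this
          have h11 : sl ≠ "retail" := by have := ne_of "retail" "retail" (by decide); rwa [show PySem.Str.lower "retail" = "retail" from by decide] at this
          simp [h0, h1, h2, h3, h4, h5, h6, h7, h8, h9, h10, h11]

-- ===== VERDICT (by name: the statement is the Claim_ definition above) =====
theorem normalise_class_spec : Claim_equal_normalise_class := by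
  intro raw _
  exact normalise_class_eq_alt raw
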